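-- pv_equiv track=rewrite | github.com/AleksandarLukic96/02180_Board_game_assignment | rules.py | capture_opposite
-- ===== SOURCE A (Python) =====
-- def capture_opposite(lastPit, pits):
--
--     for (p1, p2) in zip([0, 1, 2, 3, 4, 5], [12, 11, 10, 9, 8, 7]):
--         # Player1 side
--         if lastPit == p1 and pits[p2] != 0:
--             pits[6] = pits[6] + pits[p1] + pits[p2]
--             pits[p1] = 0
--             pits[p2] = 0
--
--         elif lastPit == p2 and pits[p1] != 0:
--             pits[13] = pits[13] + pits[p1] + pits[p2]
--             pits[p1] = 0
--             pits[p2] = 0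
--
--     return pits
-- ===== SOURCE B (Python) =====
-- def capture_opposite(lastPit, pits):
--     # Closed-form: the opposite pit of lastPit is 12 - lastPit; branch on which side.
--     # Mutates pits in place, like the original.
--     if 0 <= lastPit <= 5:
--         opp = 12 - lastPit
--         if pits[opp] != 0:
--             pits[6] = pits[6] + pits[lastPit] + pits[opp]
--             pits[lastPit] = 0
--             pits[opp] = 0
--     elif 7 <= lastPit <= 12:
--         opp = 12 - lastPit
--         if pits[opp] != 0:
--             pits[13] = pits[13] + pits[lastPit] + pits[opp]
--             pits[lastPit] = 0
--             pits[opp] = 0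
--     return pits
-- ===== Notes on version B (the rewrite author's own statement) =====
-- stated objective: simpler
-- what changed: Replaced the scan over the six constant pit pairs with a closed-form computation of the opposite pit (opp = 12 - lastPit) behind a single side-of-board branch.
import Mathlib
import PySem

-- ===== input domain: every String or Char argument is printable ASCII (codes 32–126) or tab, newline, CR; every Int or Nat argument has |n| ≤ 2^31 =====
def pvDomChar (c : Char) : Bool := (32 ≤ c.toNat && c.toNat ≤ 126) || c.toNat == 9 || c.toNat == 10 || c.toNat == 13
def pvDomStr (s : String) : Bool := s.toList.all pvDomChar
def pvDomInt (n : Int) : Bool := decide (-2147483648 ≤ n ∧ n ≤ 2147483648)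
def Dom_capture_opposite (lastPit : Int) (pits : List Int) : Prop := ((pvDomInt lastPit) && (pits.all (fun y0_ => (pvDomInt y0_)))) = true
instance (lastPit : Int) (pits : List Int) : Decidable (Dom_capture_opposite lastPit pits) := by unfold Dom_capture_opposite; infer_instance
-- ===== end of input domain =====

-- B replaces A's six-pair scan by the closed form opp = 12 - lastPit behind one side-of-board
-- branch (objective: simpler). Both A and B mutate `pits` in place in Python in the same way;
-- the equivalence proved here is about the return value.

-- ===== PORT A =====
def capture_opposite (lastPit : Int) (pits : List Int) : List Int :=
  (List.zip [0, 1, 2, 3, 4, 5] [12, 11, 10, 9, 8, 7]).foldl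
    (fun pits (pr : Int × Int) =>
      if lastPit = pr.1 ∧ PySem.List.pyGetD pits pr.2 0 ≠ 0 then
        PySem.List.pySetD
          (PySem.List.pySetD
            (PySem.List.pySetD pits 6
              (PySem.List.pyGetD pits 6 0 + PySem.List.pyGetD pits pr.1 0 + PySem.List.pyGetD pits pr.2 0))
            pr.1 0)
          pr.2 0
      else if lastPit = pr.2 ∧ PySem.List.pyGetD pits pr.1 0 ≠ 0 then
        PySem.List.pySetD
          (PySem.List.pySetD
            (PySem.List.pySetD pits 13
              (PySem.List.pyGetD pits 13 0 + PySem.List.pyGetD pits pr.1 0 + PySem.List.pyGetD pits pr.2 0))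
            pr.1 0)
          pr.2 0
      else pits)
    pits

-- ===== PORT B =====
def capture_opposite_alt (lastPit : Int) (pits : List Int) : List Int :=
  if 0 ≤ lastPit ∧ lastPit ≤ 5 then
    if PySem.List.pyGetD pits (12 - lastPit) 0 ≠ 0 then
      PySem.List.pySetD
        (PySem.List.pySetD
          (PySem.List.pySetD pits 6
            (PySem.List.pyGetD pits 6 0 + PySem.List.pyGetD pits lastPit 0 + PySem.List.pyGetD pits (12 - lastPit) 0))
          lastPit 0)
        (12 - lastPit) 0
    else pits
  else if 7 ≤ lastPit ∧ lastPit ≤ 12 then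
    if PySem.List.pyGetD pits (12 - lastPit) 0 ≠ 0 then
      PySem.List.pySetD
        (PySem.List.pySetD
          (PySem.List.pySetD pits 13
            (PySem.List.pyGetD pits 13 0 + PySem.List.pyGetD pits lastPit 0 + PySem.List.pyGetD pits (12 - lastPit) 0))
          lastPit 0)
        (12 - lastPit) 0
    else pits
  else pits

-- ===== PRECONDITION & SPEC =====
-- Pre_ is exactly the set of inputs on which the Python A returns (no IndexError): when
-- lastPit is on a side of the board the opposite pit 12 - lastPit must exist, and when a
-- capture on player 2's side fires the store index 13 must also exist.
def Pre_capture_opposite (lastPit : Int) (pits : List Int) : Prop :=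
  (0 ≤ lastPit ∧ lastPit ≤ 5 → 12 - lastPit < (pits.length : Int)) ∧
  (7 ≤ lastPit ∧ lastPit ≤ 12 →
    12 - lastPit < (pits.length : Int) ∧
    (PySem.List.pyGetD pits (12 - lastPit) 0 ≠ 0 → 14 ≤ (pits.length : Int)))
instance (lastPit : Int) (pits : List Int) : Decidable (Pre_capture_opposite lastPit pits) := by
  unfold Pre_capture_opposite; infer_instance
def pvWitness_capture_opposite : Int × List Int := (2, [4, 4, 4, 4, 4, 4, 0, 4, 4, 4, 4, 4, 4, 0])
def Spec_capture_opposite (lastPit : Int) (pits : List Int) (out : List Int) : Prop := out = capture_opposite_alt lastPit pits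
instance (lastPit : Int) (pits : List Int) (out : List Int) : Decidable (Spec_capture_opposite lastPit pits out) := by unfold Spec_capture_opposite; infer_instance

-- ===== CLAIM (what is proved, stated in full; the proofs are below) =====
def Claim_equal_capture_opposite : Prop := ∀ (lastPit : Int) (pits : List Int), Dom_capture_opposite lastPit pits → Pre_capture_opposite lastPit pits → Spec_capture_opposite lastPit pits (capture_opposite lastPit pits)

-- ===== LEMMAS AND PROOFS =====

theorem pySetD_comm_int (xs : List Int) (i j v w : Int) (hi : 0 ≤ i) (hj : 0 ≤ j) (h : i ≠ j) :
    PySem.List.pySetD (PySem.List.pySetD xs i v) j w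
      = PySem.List.pySetD (PySem.List.pySetD xs j w) i v := by
  simp only [PySem.List.pySetD_of_nonneg, hi, hj]
  apply List.set_comm
  omega

theorem cap_side2 (pits : List Int) (p1 p2 : Int) (h1 : 0 ≤ p1) (h2 : 0 ≤ p2) (hne : p1 ≠ p2) :
    PySem.List.pySetD (PySem.List.pySetD (PySem.List.pySetD pits 13
        (PySem.List.pyGetD pits 13 0 + PySem.List.pyGetD pits p1 0 + PySem.List.pyGetD pits p2 0)) p1 0) p2 0
      = PySem.List.pySetD (PySem.List.pySetD (PySem.List.pySetD pits 13
        (PySem.List.pyGetD pits 13 0 + PySem.List.pyGetD pits p2 0 + PySem.List.pyGetD pits p1 0)) p2 0) p1 0 := by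
  rw [add_right_comm]
  exact pySetD_comm_int _ p1 p2 0 0 h1 h2 hne

-- ===== VERDICT (by name: the statement is the Claim_ definition above) =====
theorem capture_opposite_spec : Claim_equal_capture_opposite := by
  intro l pits _ _
  unfold Spec_capture_opposite capture_opposite capture_opposite_alt
  by_cases h0 : l = 0
  · subst h0; norm_num
  by_cases h1 : l = 1
  · subst h1; norm_num
  by_cases h2 : l = 2
  · subst h2; norm_num
  by_cases h3 : l = 3
  · subst h3; norm_num
  by_cases h4 : l = 4
  · subst h4; norm_num
  by_cases h5 : l = 5
  · subst h5; norm_num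
  by_cases h7 : l = 7
  · subst h7; norm_num
    by_cases hz : PySem.List.pyGetD pits 5 0 = 0
    · simp [hz]
    · simp only [if_neg hz]
      exact cap_side2 pits 5 7 (by norm_num) (by norm_num) (by norm_num)
  by_cases h8 : l = 8
  · subst h8; norm_num
    by_cases hz : PySem.List.pyGetD pits 4 0 = 0
    · simp [hz]
    · simp only [if_neg hz]
      exact cap_side2 pits 4 8 (by norm_num) (by norm_num) (by norm_num)
  by_cases h9 : l = 9
  · subst h9; norm_num
    by_cases hz : PySem.List.pyGetD pits 3 0 = 0
    · simp [hz]
    · simp only [if_neg hz]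
      exact cap_side2 pits 3 9 (by norm_num) (by norm_num) (by norm_num)
  by_cases h10 : l = 10
  · subst h10; norm_num
    by_cases hz : PySem.List.pyGetD pits 2 0 = 0
    · simp [hz]
    · simp only [if_neg hz]
      exact cap_side2 pits 2 10 (by norm_num) (by norm_num) (by norm_num)
  by_cases h11 : l = 11
  · subst h11; norm_num
    by_cases hz : PySem.List.pyGetD pits 1 0 = 0
    · simp [hz]
    · simp only [if_neg hz]
      exact cap_side2 pits 1 11 (by norm_num) (by norm_num) (by norm_num)
  by_cases h12 : l = 12
  · subst h12; norm_num
    by_cases hz : PySem.List.pyGetD pits 0 0 = 0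
    · simp [hz]
    · simp only [if_neg hz]
      exact cap_side2 pits 0 12 (by norm_num) (by norm_num) (by norm_num)
  simp [h0, h1, h2, h3, h4, h5, h7, h8, h9, h10, h11, h12]
  rw [if_neg (by omega), if_neg (by omega)]
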